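-- pv_equiv track=rewrite | github.com/h2oai/datatable | src/datatable/exceptions.py | _split_backtick_string
-- ===== SOURCE A (Python) =====
-- def _split_backtick_string(string):
--     r"""
--     Helper function for processing an exception message with
--     backticks. This function will split the string at the
--     backtick characters, while also taking care of unescaping any
--     escaped special symbols. For example:
--
--         "abc" -> ["abc"]
--         "a`b`c" -> ["a", "b", "c"]
--         "`abc`" -> ["", "abc"]
--         "`\`a\\bc\``" -> ["", "`a\bc`"]
--     """
--     out = []
--     part = ""
--     escape_next = False
--     for ch in string:
--         if escape_next:
--             part += ch
--             escape_next = False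
--         elif ch == '\\':
--             escape_next = True
--         elif ch == '`':
--             out.append(part)
--             part = ""
--         else:
--             part += ch
--     if part:
--         out.append(part)
--     return out
-- ===== SOURCE B (Python) =====
-- def _unescape(seg):
--     res = []
--     i = 0
--     n = len(seg)
--     while i < n:
--         c = seg[i]
--         if c == '\\':
--             if i + 1 < n:
--                 res.append(seg[i + 1])
--             i += 2
--         else:
--             res.append(c)
--             i += 1
--     return "".join(res)
--
--
-- def _split_backtick_string(string):
--     # Pass 1: indices of unescaped backticks (boundaries only, no building).
--     bounds = []
--     esc = False
--     for i, ch in enumerate(string):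
--         if esc:
--             esc = False
--         elif ch == '\\':
--             esc = True
--         elif ch == '`':
--             bounds.append(i)
--     # Cut raw segments between boundaries, then unescape each.
--     segs = []
--     prev = 0
--     for b in bounds:
--         segs.append(string[prev:b])
--         prev = b + 1
--     segs.append(string[prev:])
--     out = [_unescape(s) for s in segs]
--     # Tail rule: the final segment is kept only if it unescapes to non-empty.
--     if out[-1] == "":
--         out.pop()
--     return out
-- ===== Notes on version B (the rewrite author's own statement) =====
-- stated objective: simpler
-- what changed: A's single pass that accumulates output parts character-by-character with an escape flag is replaced by a decomposition into three small stages: a scan that only collects indices of unescaped backticks, slicing the string into raw segments at those indices, and mapping a separate unescaper over the segments (with one tail rule dropping a final empty segment).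
import Mathlib
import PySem

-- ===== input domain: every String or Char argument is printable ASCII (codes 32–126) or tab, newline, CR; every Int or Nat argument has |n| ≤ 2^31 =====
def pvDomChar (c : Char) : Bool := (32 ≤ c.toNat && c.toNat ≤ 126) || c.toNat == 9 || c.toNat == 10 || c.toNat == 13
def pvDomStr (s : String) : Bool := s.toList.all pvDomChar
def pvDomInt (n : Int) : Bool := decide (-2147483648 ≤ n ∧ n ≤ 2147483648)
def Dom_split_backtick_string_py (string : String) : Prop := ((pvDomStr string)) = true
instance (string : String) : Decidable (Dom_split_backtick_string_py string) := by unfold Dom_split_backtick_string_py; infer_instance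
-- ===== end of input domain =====

-- B replaces A's accumulate-as-you-go state machine by a boundary-index scan, slicing into
-- raw segments and a separate per-segment unescaper (objective: simpler decomposition).

-- ===== PORT A =====
-- One step of A's for-loop; state = (out, part, escape_next); part as List Char, built to String at the end.
def pvAStep (st : List (List Char) × List Char × Bool) (ch : Char) :
    List (List Char) × List Char × Bool :=
  let (out, part, esc) := st
  if esc then (out, part ++ [ch], false)
  else if ch = '\\' then (out, part, true)
  else if ch = '`' then (out ++ [part], [], false)
  else (out, part ++ [ch], false)

def split_backtick_string_py (string : String) : List String :=
  let st := string.toList.foldl pvAStep ([], [], false)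
  (if st.2.1 ≠ [] then st.1 ++ [st.2.1] else st.1).map String.ofList

-- ===== PORT B =====
-- Source B's while-loop unescaper: '\' consumes the following char (a dangling final '\' is dropped).
def pvUnescape : List Char → List Char
  | [] => []
  | c :: rest =>
    if c = '\\' then
      match rest with
      | [] => []
      | d :: rest' => d :: pvUnescape rest'
    else c :: pvUnescape rest

-- Source B's pass 1: for i, ch in enumerate(string), collecting indices of unescaped backticks.
def pvBounds : List Char → Nat → Bool → List Nat
  | [], _, _ => []
  | ch :: rest, i, esc =>
    if esc then pvBounds rest (i + 1) false
    else if ch = '\\' then pvBounds rest (i + 1) true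
    else if ch = '`' then i :: pvBounds rest (i + 1) false
    else pvBounds rest (i + 1) false

-- Source B's pass 2: segs.append(string[prev:b]); prev = b+1; finally segs.append(string[prev:]).
-- The slices always have 0 ≤ prev ≤ b ≤ len, where Python slicing is exactly drop-then-take.
def pvSegs (l : List Char) : List Nat → Nat → List (List Char)
  | [], prev => [l.drop prev]
  | b :: bs, prev => (l.drop prev).take (b - prev) :: pvSegs l bs (b + 1)

def split_backtick_string_py_alt (string : String) : List String :=
  let l := string.toList
  let out := (pvSegs l (pvBounds l 0 false) 0).map pvUnescape
  (if out.getLast? = some [] then out.dropLast else out).map String.ofList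

-- ===== PRECONDITION & SPEC =====
def Spec_split_backtick_string_py (string : String) (out : List String) : Prop := out = split_backtick_string_py_alt string
instance (string : String) (out : List String) : Decidable (Spec_split_backtick_string_py string out) := by unfold Spec_split_backtick_string_py; infer_instance

-- ===== CLAIM (what is proved, stated in full; the proofs are below) =====
def Claim_equal_split_backtick_string_py : Prop := ∀ (string : String), Dom_split_backtick_string_py string → Spec_split_backtick_string_py string (split_backtick_string_py string)

-- ===== LEMMAS AND PROOFS =====

-- prepend a prefix onto the first block of a block list
def pvConsH (x : List Char) : List (List Char) → List (List Char)
  | [] => [x]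
  | p :: ps => (x ++ p) :: ps

theorem pvConsH_ne (x : List Char) (l : List (List Char)) : pvConsH x l ≠ [] := by
  cases l <;> simp [pvConsH]

theorem pvConsH_comp (x y : List Char) (l : List (List Char)) :
    pvConsH x (pvConsH y l) = pvConsH (x ++ y) l := by
  cases l <;> simp [pvConsH]

-- Common reference point of both proofs: the unescaped parts (last entry = pending part).
def pvS : List Char → List (List Char)
  | [] => [[]]
  | '\\' :: [] => [[]]
  | '\\' :: c :: r => pvConsH [c] (pvS r)
  | '`' :: r => [] :: pvS r
  | c :: r => pvConsH [c] (pvS r)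

theorem pvS_ne (l : List Char) : pvS l ≠ [] := by
  induction l using pvS.induct <;> simp_all [pvS, pvConsH_ne]

-- reductions of A's step function
theorem pvStep_esc (out : List (List Char)) (part : List Char) (ch : Char) :
    pvAStep (out, part, true) ch = (out, part ++ [ch], false) := by simp [pvAStep]

theorem pvStep_bs (out : List (List Char)) (part : List Char) :
    pvAStep (out, part, false) '\\' = (out, part, true) := by simp [pvAStep]

theorem pvStep_bt (out : List (List Char)) (part : List Char) :
    pvAStep (out, part, false) '`' = (out ++ [part], [], false) := by simp [pvAStep]

theorem pvStep_other (out : List (List Char)) (part : List Char) (ch : Char)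
    (h1 : ch ≠ '\\') (h2 : ch ≠ '`') :
    pvAStep (out, part, false) ch = (out, part ++ [ch], false) := by simp [pvAStep, h1, h2]

-- ---- A-side: the fold computes dropLast / getLast of pvConsH part (pvS l) ----
theorem pvA_fold (l : List Char) : ∀ (out : List (List Char)) (part : List Char),
    (l.foldl pvAStep (out, part, false)).1 = out ++ (pvConsH part (pvS l)).dropLast ∧
    (l.foldl pvAStep (out, part, false)).2.1 = ((pvConsH part (pvS l)).getLast?).getD [] := by
  induction l using pvS.induct with
  | case1 => intro out part; simp [pvS, pvConsH]
  | case2 => intro out part; simp [pvS, pvConsH, List.foldl, pvStep_bs]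
  | case3 c r ih =>
      intro out part
      have h := ih out (part ++ [c])
      simp only [List.foldl, pvStep_bs, pvStep_esc] at *
      rw [pvS.eq_3, pvConsH_comp]
      exact h
  | case4 r ih =>
      intro out part
      have h := ih (out ++ [part]) []
      simp only [List.foldl, pvStep_bt] at *
      rcases hS : pvS r with _ | ⟨p, ps⟩
      · exact absurd hS (pvS_ne r)
      · rw [hS] at h
        rw [pvS.eq_4, hS]
        simp only [pvConsH, List.nil_append, List.append_nil] at *
        refine ⟨?_, ?_⟩
        · rw [h.1]; simp
        · rw [h.2]; simp
  | case5 c r g1 g2 g3 ih =>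
      intro out part
      have hc : c ≠ '\\' := by
        intro h; cases r with
        | nil => exact g1 h rfl
        | cons a b => exact g2 a b h rfl
      have hq : c ≠ '`' := fun h => g3 h
      have h := ih out (part ++ [c])
      simp only [List.foldl, pvStep_other out part c hc hq] at *
      rw [pvS.eq_5 c r g1 g2 g3, pvConsH_comp]
      exact h

-- ---- B-side lemmas ----
theorem pvBounds_shift : ∀ (l : List Char) (i : Nat) (esc : Bool),
    pvBounds l i esc = (pvBounds l 0 esc).map (· + i)
  | [], i, esc => by simp [pvBounds]
  | ch :: rest, i, esc => by
      simp only [pvBounds]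
      split_ifs <;>
        rw [pvBounds_shift rest (i + 1), pvBounds_shift rest (0 + 1)] <;>
        simp [List.map_map, Function.comp_def, Nat.add_assoc, Nat.add_comm 1 i]

theorem pvSegs_shift (l : List Char) (c : Char) : ∀ (bs : List Nat) (prev : Nat),
    pvSegs (c :: l) (bs.map (· + 1)) (prev + 1) = pvSegs l bs prev
  | [], prev => by simp [pvSegs]
  | b :: bs, prev => by
      simp [pvSegs, pvSegs_shift l c bs (b + 1), Nat.succ_sub_succ]

theorem pvSegs_cons (l : List Char) (c : Char) (bs : List Nat) :
    pvSegs (c :: l) (bs.map (· + 1)) 0 = pvConsH [c] (pvSegs l bs 0) := by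
  cases bs with
  | nil => simp [pvSegs, pvConsH]
  | cons b bs => simp [pvSegs, pvConsH, pvSegs_shift, List.take_succ_cons]

-- raw (still escaped) segments between the boundaries
def pvR : List Char → List (List Char)
  | [] => [[]]
  | '\\' :: [] => [['\\']]
  | '\\' :: c :: r => pvConsH ['\\', c] (pvR r)
  | '`' :: r => [] :: pvR r
  | c :: r => pvConsH [c] (pvR r)

theorem pvR_ne (l : List Char) : pvR l ≠ [] := by
  induction l using pvR.induct <;> simp_all [pvR, pvConsH_ne]

theorem pvSegs_bounds (l : List Char) : pvSegs l (pvBounds l 0 false) 0 = pvR l := by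
  induction l using pvR.induct with
  | case1 => simp [pvBounds, pvSegs, pvR]
  | case2 => simp [pvBounds, pvSegs, pvR]
  | case3 c r ih =>
      have h2 : pvBounds ('\\' :: c :: r) 0 false
          = ((pvBounds r 0 false).map (· + 1)).map (· + 1) := by
        simp only [pvBounds]
        rw [pvBounds_shift r 2]
        simp only [List.map_map, Function.comp_def]
        exact List.map_congr_left (fun a _ => by omega)
      rw [h2, pvSegs_cons, pvSegs_cons, ih, pvConsH_comp, pvR.eq_3]
      rfl
  | case4 r ih =>
      have h2 : pvBounds ('`' :: r) 0 false = 0 :: (pvBounds r 0 false).map (· + 1) := by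
        simp only [pvBounds]
        rw [pvBounds_shift r 1]
        simp
      rw [h2]
      simp only [pvSegs, pvR]
      rw [show (0:Nat) + 1 = 0 + 1 from rfl, pvSegs_shift, ih]
      simp
  | case5 c r g1 g2 g3 ih =>
      have hc : c ≠ '\\' := by
        intro h; cases r with
        | nil => exact g1 h rfl
        | cons a b => exact g2 a b h rfl
      have hq : c ≠ '`' := fun h => g3 h
      have h2 : pvBounds (c :: r) 0 false = (pvBounds r 0 false).map (· + 1) := by
        simp only [pvBounds, if_neg hc, if_neg hq]
        rw [pvBounds_shift r 1]
        simp
      rw [h2, pvSegs_cons, ih, pvR.eq_5 c r g1 g2 g3]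

theorem pvUnescape_other (c : Char) (rest : List Char) (hc : c ≠ '\\') :
    pvUnescape (c :: rest) = c :: pvUnescape rest := by
  cases rest with
  | nil => rw [pvUnescape.eq_2, if_neg hc]
  | cons d r => rw [pvUnescape.eq_3, if_neg hc]

theorem pvUnescape_R (l : List Char) : (pvR l).map pvUnescape = pvS l := by
  induction l using pvR.induct with
  | case1 => simp [pvR, pvS, pvUnescape]
  | case2 => simp [pvR, pvS, pvUnescape]
  | case3 c r ih =>
      rcases hR : pvR r with _ | ⟨p, ps⟩
      · exact absurd hR (pvR_ne r)
      · rw [hR] at ih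
        rw [pvR.eq_3, pvS.eq_3, hR, ← ih]
        simp [pvConsH, pvUnescape]
  | case4 r ih => simp [pvR, pvS, ih, pvUnescape.eq_1]
  | case5 c r g1 g2 g3 ih =>
      have hc : c ≠ '\\' := by
        intro h; cases r with
        | nil => exact g1 h rfl
        | cons a b => exact g2 a b h rfl
      rcases hR : pvR r with _ | ⟨p, ps⟩
      · exact absurd hR (pvR_ne r)
      · rw [hR] at ih
        rw [pvR.eq_5 c r g1 g2 g3, pvS.eq_5 c r g1 g2 g3, hR, ← ih]
        simp [pvConsH]
        exact pvUnescape_other c p hc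

-- ===== VERDICT (by name: the statement is the Claim_ definition above) =====
theorem split_backtick_string_py_spec : Claim_equal_split_backtick_string_py := by
  intro s _
  unfold Spec_split_backtick_string_py split_backtick_string_py split_backtick_string_py_alt
  dsimp only
  have hB : (pvSegs s.toList (pvBounds s.toList 0 false) 0).map pvUnescape = pvS s.toList := by
    rw [pvSegs_bounds, pvUnescape_R]
  have hA := pvA_fold s.toList [] []
  rcases hS : pvS s.toList with _ | ⟨p, ps⟩
  · exact absurd hS (pvS_ne s.toList)
  · rw [hS] at hA hB
    simp only [pvConsH, List.nil_append] at hA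
    rw [hB, hA.1, hA.2]
    rcases hg : (p :: ps).getLast? with _ | g
    · simp at hg
    · simp only [Option.getD]
      by_cases hge : g = []
      · subst hge; simp
      · have : (p :: ps).dropLast ++ [g] = p :: ps :=
          List.dropLast_append_getLast? g hg
        simp [hge, this]
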